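-- pv_equiv track=rewrite | github.com/ThuTranggggg/TechShop | services/ai_service/modules/ai/application/services.py | _abandoned_cart_sessions
-- ===== SOURCE A (Python) =====
-- from typing import List, Optional, Dict, Any
--
-- def _abandoned_cart_sessions(events: List[Dict[str, Any]]) -> int:
--     session_summary: Dict[str, set[str]] = {}
--     for event in events:
--         session_id = event.get("session_id")
--         event_type = event.get("event_type")
--         if not session_id or not event_type:
--             continue
--         session_summary.setdefault(session_id, set()).add(event_type)
--     return sum(
--         1
--         for types in session_summary.values()
--         if "add_to_cart" in types and "payment_success" not in types and "order_created" not in types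
--     )
-- ===== SOURCE B (Python) =====
-- from typing import List, Dict, Any
--
--
-- def _abandoned_cart_sessions(events: List[Dict[str, Any]]) -> int:
--     added: set = set()
--     completed: set = set()
--     for event in events:
--         session_id = event.get("session_id")
--         event_type = event.get("event_type")
--         if not session_id or not event_type:
--             continue
--         if event_type == "add_to_cart":
--             added.add(session_id)
--         elif event_type in ("payment_success", "order_created"):
--             completed.add(session_id)
--     return len(added - completed)
-- ===== Notes on version B (the rewrite author's own statement) =====
-- stated objective: simpler
-- what changed: Instead of grouping every event type into a per-session dict of sets and then scanning all those sets in a second counting pass, B routes only the three relevant event types into two session-id sets during the single pass and returns the size of their set-difference.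
import Mathlib
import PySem

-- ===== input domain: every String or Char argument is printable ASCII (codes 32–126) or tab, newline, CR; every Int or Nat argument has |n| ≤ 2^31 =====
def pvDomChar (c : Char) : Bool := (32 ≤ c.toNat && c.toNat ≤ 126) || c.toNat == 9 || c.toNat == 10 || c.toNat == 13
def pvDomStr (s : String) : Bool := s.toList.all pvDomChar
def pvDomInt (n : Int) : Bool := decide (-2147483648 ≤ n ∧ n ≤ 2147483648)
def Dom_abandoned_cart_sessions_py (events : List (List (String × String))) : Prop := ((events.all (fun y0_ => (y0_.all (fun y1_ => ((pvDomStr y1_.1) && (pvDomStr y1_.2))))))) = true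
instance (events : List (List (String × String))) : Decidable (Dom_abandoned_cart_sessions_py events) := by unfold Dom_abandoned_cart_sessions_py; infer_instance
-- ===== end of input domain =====

-- B replaces A's per-session dict-of-all-event-types plus a second counting pass by a single
-- pass routing the three relevant event types into two session-id sets and one set-difference (simpler).


-- ===== PORT A =====
-- event.get(k): first-match lookup in the association list; missing key and "" are both falsy,
-- so both ports read the value with default "" and treat "" as the falsy case.
def pvGet (ev : List (String × String)) (k : String) : String :=
  (((ev.find? (fun p => p.1 == k)).map (fun p => p.2)).getD "")

def pvStepA (d : PySem.Dict String (PySem.Set String)) (ev : List (String × String)) :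
    PySem.Dict String (PySem.Set String) :=
  let sid := pvGet ev "session_id"
  let ty := pvGet ev "event_type"
  if sid = "" ∨ ty = "" then d
  else d.modify sid PySem.Set.empty (fun s => PySem.Set.add s ty)

def abandoned_cart_sessions_py (events : List (List (String × String))) : Int :=
  let summary := events.foldl pvStepA PySem.Dict.empty
  (summary.values.map (fun types =>
    if "add_to_cart" ∈ types ∧ "payment_success" ∉ types ∧ "order_created" ∉ types
    then (1 : Int) else 0)).sum

-- ===== PORT B =====
def pvStepB (ac : PySem.Set String × PySem.Set String) (ev : List (String × String)) :
    PySem.Set String × PySem.Set String :=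
  let sid := pvGet ev "session_id"
  let ty := pvGet ev "event_type"
  if sid = "" ∨ ty = "" then ac
  else if ty = "add_to_cart" then (PySem.Set.add ac.1 sid, ac.2)
  else if ty = "payment_success" ∨ ty = "order_created" then (ac.1, PySem.Set.add ac.2 sid)
  else ac

def abandoned_cart_sessions_py_alt (events : List (List (String × String))) : Int :=
  let ac := events.foldl pvStepB (PySem.Set.empty, PySem.Set.empty)
  ((PySem.Set.diff ac.1 ac.2).length : Int)

-- ===== PRECONDITION & SPEC =====
def Spec_abandoned_cart_sessions_py (events : List (List (String × String))) (out : Int) : Prop := out = abandoned_cart_sessions_py_alt events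
instance (events : List (List (String × String))) (out : Int) : Decidable (Spec_abandoned_cart_sessions_py events out) := by unfold Spec_abandoned_cart_sessions_py; infer_instance

-- ===== CLAIM (what is proved, stated in full; the proofs are below) =====
def Claim_equal_abandoned_cart_sessions_py : Prop := ∀ (events : List (List (String × String))), Dom_abandoned_cart_sessions_py events → Spec_abandoned_cart_sessions_py events (abandoned_cart_sessions_py events)

-- ===== LEMMAS AND PROOFS =====

-- The relation the one-pass fold maintains between A's dict of type-sets and B's two session sets.
def pvInv (d : PySem.Dict String (PySem.Set String)) (ac : PySem.Set String × PySem.Set String) : Prop :=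
  d.keys.Nodup ∧ ac.1.Nodup ∧
  (∀ k, k ∈ ac.1 ↔ (d.contains k = true ∧ "add_to_cart" ∈ d.getD k PySem.Set.empty)) ∧
  (∀ k, k ∈ ac.2 ↔ (d.contains k = true ∧
      ("payment_success" ∈ d.getD k PySem.Set.empty ∨ "order_created" ∈ d.getD k PySem.Set.empty)))

lemma pvInv_step (d : PySem.Dict String (PySem.Set String)) (ac : PySem.Set String × PySem.Set String)
    (ev : List (String × String)) (h : pvInv d ac) : pvInv (pvStepA d ev) (pvStepB ac ev) := by
  obtain ⟨hnd, hnada, h1, h2⟩ := h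
  unfold pvStepA pvStepB
  set sid := pvGet ev "session_id" with hsid
  set ty := pvGet ev "event_type" with hty
  by_cases hguard : sid = "" ∨ ty = ""
  · simp only [hguard, if_true]; exact ⟨hnd, hnada, h1, h2⟩
  · simp only [hguard, if_false]
    rw [not_or] at hguard
    have hnd' : (d.modify sid PySem.Set.empty (fun s => PySem.Set.add s ty)).keys.Nodup := by
      rw [PySem.Dict.keys_modify]
      exact PySem.Dict.nodup_keys_insert d sid _ hnd
    by_cases hadd : ty = "add_to_cart"
    · rw [if_pos hadd]
      refine ⟨hnd', PySem.Set.nodup_add _ _ hnada, ?_, ?_⟩ <;> intro k <;>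
        rw [PySem.Dict.getD_modify, PySem.Dict.contains_modify] <;>
        by_cases hk : k = sid <;> cases hc : d.contains sid <;>
        simp [PySem.Set.mem_add, hk, hc, hadd, h1 k, h2 k,
              PySem.Dict.getD_of_not_contains, h1 sid, h2 sid]
    · by_cases hpo : ty = "payment_success" ∨ ty = "order_created"
      · rw [if_neg hadd, if_pos hpo]
        refine ⟨hnd', hnada, ?_, ?_⟩ <;> intro k <;>
          rw [PySem.Dict.getD_modify, PySem.Dict.contains_modify] <;>
          by_cases hk : k = sid <;> cases hc : d.contains sid <;>
          rcases hpo with hty' | hty' <;>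
          simp [PySem.Set.mem_add, hk, hc, hty', h1 k, h2 k,
                PySem.Dict.getD_of_not_contains, h1 sid, h2 sid]
      · rw [if_neg hadd, if_neg hpo]
        rw [not_or] at hpo
        refine ⟨hnd', hnada, ?_, ?_⟩ <;> intro k <;>
          rw [PySem.Dict.getD_modify, PySem.Dict.contains_modify] <;>
          by_cases hk : k = sid <;> cases hc : d.contains sid <;>
          simp [PySem.Set.mem_add, hk, hc, h1 k, h2 k,
                PySem.Dict.getD_of_not_contains, h1 sid, h2 sid,
                Ne.symm hadd, Ne.symm hpo.1, Ne.symm hpo.2]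

lemma pvInv_count (d : PySem.Dict String (PySem.Set String)) (ac : PySem.Set String × PySem.Set String)
    (h : pvInv d ac) :
    (d.values.map (fun types =>
      if "add_to_cart" ∈ types ∧ "payment_success" ∉ types ∧ "order_created" ∉ types
      then (1 : Int) else 0)).sum = ((PySem.Set.diff ac.1 ac.2).length : Int) := by
  obtain ⟨hnd, hnada, h1, h2⟩ := h
  rw [PySem.Dict.values_eq_map_keys d hnd PySem.Set.empty, List.map_map]
  have hfun : ((fun types => if "add_to_cart" ∈ types ∧ "payment_success" ∉ types ∧
        "order_created" ∉ types then (1 : Int) else 0) ∘ (fun k => d.getD k PySem.Set.empty)) =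
      fun k => if (decide ("add_to_cart" ∈ d.getD k PySem.Set.empty ∧
        "payment_success" ∉ d.getD k PySem.Set.empty ∧
        "order_created" ∉ d.getD k PySem.Set.empty)) = true then (1 : Int) else 0 := by
    funext k; simp
  rw [hfun, PySem.List.sum_map_ite_one_zero, List.countP_eq_length_filter]
  have hperm : (d.keys.filter (fun k => decide ("add_to_cart" ∈ d.getD k PySem.Set.empty ∧
      "payment_success" ∉ d.getD k PySem.Set.empty ∧
      "order_created" ∉ d.getD k PySem.Set.empty))).Perm (PySem.Set.diff ac.1 ac.2) := by
    refine (List.perm_ext_iff_of_nodup (hnd.filter _) (hnada.filter _)).mpr ?_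
    intro a
    have hca := PySem.Dict.contains_iff_mem_keys d a
    have hc2 : (ac.2.contains a = false) ↔ a ∉ ac.2 := by simp
    simp only [List.mem_filter, decide_eq_true_eq, Bool.not_eq_eq_eq_not,
      Bool.not_true]
    rw [hc2, ← hca]
    have h1a := h1 a
    have h2a := h2 a
    tauto
  rw [hperm.length_eq]

-- ===== VERDICT (by name: the statement is the Claim_ definition above) =====
theorem abandoned_cart_sessions_py_spec : Claim_equal_abandoned_cart_sessions_py := by
  intro events hdom
  clear hdom
  simp only [Spec_abandoned_cart_sessions_py, abandoned_cart_sessions_py, abandoned_cart_sessions_py_alt]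
  have h : pvInv (events.foldl pvStepA PySem.Dict.empty)
      (events.foldl pvStepB (PySem.Set.empty, PySem.Set.empty)) := by
    induction events using List.reverseRecOn with
    | nil =>
      refine ⟨PySem.Dict.nodup_keys_empty, List.nodup_nil, ?_, ?_⟩ <;>
        intro k <;> simp [PySem.Set.empty, PySem.Dict.contains_empty]
    | append_singleton l ev ih =>
      simpa [List.foldl_append] using pvInv_step _ _ ev ih
  exact pvInv_count _ _ h
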